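-- pv_equiv track=rewrite | github.com/thomas-vincent/cardo | cardo/_cardo.py | bipartition_it
-- ===== SOURCE A (Python) =====
-- def bipartition_it(elements):
--     def _bpart_rec(elems, set1, set2):
--         if len(set1) + len(set2) < len(elements):
--             for s1,s2 in _bpart_rec(elems[1:], set1 + [elems[0]], set2):
--                 yield s1, s2
--             for s1,s2 in _bpart_rec(elems[1:], set1, set2 + [elems[0]]):
--                 yield s1, s2
--         else:
--             yield set1, set2
--     return _bpart_rec(elements, [], [])
-- ===== SOURCE B (Python) =====
-- def bipartition_it(elements):
--     parts = [([], [])]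
--     for e in reversed(elements):
--         parts = [([e] + s1, s2) for s1, s2 in parts] \
--               + [(s1, [e] + s2) for s1, s2 in parts]
--     yield from parts
-- ===== Notes on version B (the rewrite author's own statement) =====
-- stated objective: alternative
-- what changed: Replaces the nested recursive generator (which re-slices the list and rebuilds both accumulators at every level) with a single iterative back-to-front product construction: one list of partial partitions is doubled per element, consing the element into set1 for the first half and set2 for the second, which reproduces A's exact enumeration order.
import Mathlib
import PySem

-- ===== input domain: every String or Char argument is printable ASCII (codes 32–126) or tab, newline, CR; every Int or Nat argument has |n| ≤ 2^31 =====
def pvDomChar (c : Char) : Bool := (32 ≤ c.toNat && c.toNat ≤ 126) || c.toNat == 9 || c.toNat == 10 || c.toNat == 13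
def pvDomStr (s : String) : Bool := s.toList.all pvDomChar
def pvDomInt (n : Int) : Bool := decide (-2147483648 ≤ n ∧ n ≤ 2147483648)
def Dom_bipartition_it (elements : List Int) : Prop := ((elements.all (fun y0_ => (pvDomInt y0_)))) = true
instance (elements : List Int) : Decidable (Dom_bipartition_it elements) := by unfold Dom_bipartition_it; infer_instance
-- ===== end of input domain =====

-- B replaces A's nested recursive generator by an iterative back-to-front doubling of a
-- list of partial partitions (alternative decomposition, same enumeration order).

-- ===== PORT A =====
-- _bpart_rec(elems, set1, set2): recursion on elems; the `n` parameter carries len(elements)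
-- of the enclosing call, against which the Python compares len(set1)+len(set2).
-- When the guard holds but elems is empty, Python's elems[0] would raise IndexError; that
-- state is unreachable from bipartition_it's call (invariant |set1|+|set2|+|elems| = n),
-- so the port returns [] there.
def bpartRec (n : Nat) : List Int → List Int → List Int → List (List Int × List Int)
  | elems, set1, set2 =>
    if set1.length + set2.length < n then
      match elems with
      | [] => []
      | e :: rest =>
          bpartRec n rest (set1 ++ [e]) set2 ++ bpartRec n rest set1 (set2 ++ [e])
    else
      [(set1, set2)]

def bipartition_it (elements : List Int) : List (List Int × List Int) :=
  bpartRec elements.length elements [] []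

-- ===== PORT B =====
-- parts starts as [([],[])]; for e in reversed(elements) it becomes
-- (e consed into set1 of each) ++ (e consed into set2 of each).
def bipartition_it_alt (elements : List Int) : List (List Int × List Int) :=
  elements.reverse.foldl
    (fun parts e =>
      parts.map (fun p => (e :: p.1, p.2)) ++ parts.map (fun p => (p.1, e :: p.2)))
    [([], [])]

-- ===== PRECONDITION & SPEC =====
def Spec_bipartition_it (elements : List Int) (out : List (List Int × List Int)) : Prop := out = bipartition_it_alt elements
instance (elements : List Int) (out : List (List Int × List Int)) : Decidable (Spec_bipartition_it elements out) := by unfold Spec_bipartition_it; infer_instance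

-- ===== CLAIM (what is proved, stated in full; the proofs are below) =====
def Claim_equal_bipartition_it : Prop := ∀ (elements : List Int), Dom_bipartition_it elements → Spec_bipartition_it elements (bipartition_it elements)

-- ===== LEMMAS AND PROOFS =====

-- B as a foldr (the foldl over the reversed list).
def bpartCore (elems : List Int) : List (List Int × List Int) :=
  elems.foldr
    (fun e acc =>
      acc.map (fun p => (e :: p.1, p.2)) ++ acc.map (fun p => (p.1, e :: p.2)))
    [([], [])]

theorem bipartition_it_alt_eq_core (elements : List Int) :
    bipartition_it_alt elements = bpartCore elements := by
  simp [bipartition_it_alt, bpartCore, List.foldl_reverse]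

-- The key invariant: with n = |set1| + |set2| + |elems|, A's recursion produces exactly
-- B's core list with the accumulators appended on the left of each component.
theorem bpartRec_eq (n : Nat) (elems set1 set2 : List Int)
    (h : set1.length + set2.length + elems.length = n) :
    bpartRec n elems set1 set2 =
      (bpartCore elems).map (fun p => (set1 ++ p.1, set2 ++ p.2)) := by
  induction elems generalizing set1 set2 with
  | nil =>
    rw [bpartRec]
    simp at h
    simp [bpartCore, h]
  | cons e rest ih =>
    rw [bpartRec]
    have hlt : set1.length + set2.length < n := by simp at h; omega
    simp only [if_pos hlt]
    rw [ih (set1 ++ [e]) set2 (by simp at h ⊢; omega),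
        ih set1 (set2 ++ [e]) (by simp at h ⊢; omega)]
    simp only [bpartCore, List.foldr_cons, List.map_append, List.map_map]
    congr 1 <;> (apply List.map_congr_left; intro p _; simp)

-- ===== VERDICT (by name: the statement is the Claim_ definition above) =====
theorem bipartition_it_spec : Claim_equal_bipartition_it := by
  intro elements _
  unfold Spec_bipartition_it bipartition_it
  rw [bipartition_it_alt_eq_core, bpartRec_eq elements.length elements [] [] (by simp)]
  simp
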